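-- pv_equiv track=rewrite | github.com/Olli0103/Bet-Bot | src/integrations/odds_fetcher.py | resolve_sport_keys
-- ===== SOURCE A (Python) =====
-- from typing import Any, Dict, List, Optional
--
-- def resolve_sport_keys(
--     user_base_keys: List[str],
--     api_active_keys: List[str],
-- ) -> List[str]:
--     """Expand user base-keys into exact API keys via prefix matching.
--
--     A user setting of ``tennis_atp`` will match ``tennis_atp_dubai``,
--     ``tennis_atp_wimbledon``, ``tennis_atp_challenger``, etc.
--     If a base key appears verbatim in the active list, it is included as-is.
--
--     Falls back to the original base key when the active list is empty
--     (API unavailable) so the bot doesn't go silent.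
--     """
--     if not api_active_keys:
--         return list(user_base_keys)
--
--     active_set = set(api_active_keys)
--     resolved: List[str] = []
--     seen: set = set()
--
--     for base in user_base_keys:
--         if base in active_set:
--             if base not in seen:
--                 resolved.append(base)
--                 seen.add(base)
--         # Also find sub-keys that start with base + "_"
--         for ak in sorted(api_active_keys):
--             if ak.startswith(base + "_") or ak == base:
--                 if ak not in seen:
--                     resolved.append(ak)
--                     seen.add(ak)
--         # Fallback: if nothing matched, keep the base key anyway
--         if base not in seen and not any(ak.startswith(base + "_") for ak in api_active_keys):
--             resolved.append(base)
--             seen.add(base)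
--
--     return resolved
-- ===== SOURCE B (Python) =====
-- from typing import List
--
--
-- def _bisect_left(a: List[str], x: str, lo: int, hi: int) -> int:
--     while lo < hi:
--         mid = (lo + hi) // 2
--         if a[mid] < x:
--             lo = mid + 1
--         else:
--             hi = mid
--     return lo
--
--
-- def resolve_sport_keys(
--     user_base_keys: List[str],
--     api_active_keys: List[str],
-- ) -> List[str]:
--     if not api_active_keys:
--         return list(user_base_keys)
--
--     srt = sorted(api_active_keys)
--     n = len(srt)
--     resolved: List[str] = []
--     seen: set = set()
--
--     for base in user_base_keys:
--         # verbatim match via binary search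
--         i = _bisect_left(srt, base, 0, n)
--         if i < n and srt[i] == base and base not in seen:
--             resolved.append(base)
--             seen.add(base)
--         # sub-keys form a contiguous run of the sorted list
--         pref = base + "_"
--         j = _bisect_left(srt, pref, 0, n)
--         matched = False
--         while j < n and srt[j].startswith(pref):
--             matched = True
--             k = srt[j]
--             if k not in seen:
--                 resolved.append(k)
--                 seen.add(k)
--             j += 1
--         if not matched and base not in seen:
--             resolved.append(base)
--             seen.add(base)
--
--     return resolved
-- ===== Notes on version B (the rewrite author's own statement) =====
-- stated objective: faster
-- what changed: A re-sorts the whole active list for every base key and scans it (plus a second any() scan); B sorts the active list once and, per base key, uses hand-written binary search to locate the verbatim key and the contiguous run of keys starting with base+'_', walking only that run.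
import Mathlib
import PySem

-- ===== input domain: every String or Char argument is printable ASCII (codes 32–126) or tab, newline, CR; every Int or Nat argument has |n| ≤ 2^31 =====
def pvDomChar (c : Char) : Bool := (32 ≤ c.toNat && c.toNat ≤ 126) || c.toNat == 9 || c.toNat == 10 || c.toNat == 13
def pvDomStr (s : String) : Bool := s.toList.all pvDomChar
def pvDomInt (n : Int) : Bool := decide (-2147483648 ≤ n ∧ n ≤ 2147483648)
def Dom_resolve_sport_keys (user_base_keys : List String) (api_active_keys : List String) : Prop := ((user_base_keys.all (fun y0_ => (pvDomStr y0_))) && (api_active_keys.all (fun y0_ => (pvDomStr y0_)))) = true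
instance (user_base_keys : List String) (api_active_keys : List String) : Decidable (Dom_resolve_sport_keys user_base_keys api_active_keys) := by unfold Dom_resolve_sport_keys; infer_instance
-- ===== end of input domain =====

-- B replaces A's per-base re-sort of the active list and its two linear scans by one
-- up-front sort plus binary searches: the sub-keys of a base form a contiguous run of the
-- sorted list, and only that run is walked (objective: faster; measured).

-- ===== PORT A =====
-- 'base + "_"' is ported on the code-point list ('base.toList ++ ['_']') and startswith via
-- PySem.Chars (exact: PySem.Str.startswith is the same function on .toList); sorted() is
-- ported with the code-point-list key (the identical order, in kernel-reducible form).
def resolve_sport_keys (user_base_keys : List String) (api_active_keys : List String) : List String :=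
  if api_active_keys.isEmpty then user_base_keys
  else
    let active_set : PySem.Set String := PySem.Set.ofList api_active_keys
    (user_base_keys.foldl (fun (st : List String × PySem.Set String) base =>
      -- if base in active_set: if base not in seen: append
      let st :=
        if PySem.Set.contains active_set base then
          if !(PySem.Set.contains st.2 base) then (st.1 ++ [base], PySem.Set.add st.2 base)
          else st
        else st
      -- for ak in sorted(api_active_keys): …
      let st :=
        (PySem.List.sorted api_active_keys (fun s => s.toList) false).foldl
          (fun st ak =>
            if PySem.Chars.startswith ak.toList (base.toList ++ ['_']) || ak == base then
              if !(PySem.Set.contains st.2 ak) then (st.1 ++ [ak], PySem.Set.add st.2 ak)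
              else st
            else st) st
      -- fallback
      if !(PySem.Set.contains st.2 base)
          && !(api_active_keys.any (fun ak => PySem.Chars.startswith ak.toList (base.toList ++ ['_']))) then
        (st.1 ++ [base], PySem.Set.add st.2 base)
      else st) ([], PySem.Set.empty)).1

-- ===== PORT B =====
-- _bisect_left(a, x, lo, hi) from Source B; indices stay in [0, len a], so 'a[mid]' is List.getD
-- (exact: mid is always in range), '//2' on the nonnegative ints is Nat division and the
-- str comparison is PySem.Chars.strLt on code points; the
-- fuel argument (= hi - lo, an upper bound on the iterations) only makes the loop structural.
def bisectGo (a : List String) (x : String) : Nat → Nat → Nat → Nat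
  | 0, lo, _ => lo
  | fuel + 1, lo, hi =>
    if lo < hi then
      if PySem.Chars.strLt (a.getD ((lo + hi) / 2) "").toList x.toList then
        bisectGo a x fuel ((lo + hi) / 2 + 1) hi
      else bisectGo a x fuel lo ((lo + hi) / 2)
    else lo

def bisectLeftStr (a : List String) (x : String) (lo hi : Nat) : Nat :=
  bisectGo a x (hi - lo) lo hi

-- the 'while j < n and srt[j].startswith(pref)' loop of Source B; state = (matched, resolved,
-- seen); fuel (= n - j, an upper bound on the iterations) only makes the loop structural.
def walkGo (srt : List String) (pref : List Char) :
    Nat → Nat → Bool × List String × PySem.Set String → Bool × List String × PySem.Set String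
  | 0, _, st => st
  | fuel + 1, j, st =>
    if j < srt.length then
      let k := srt.getD j ""
      if PySem.Chars.startswith k.toList pref then
        walkGo srt pref fuel (j + 1)
          (true,
            if !(PySem.Set.contains st.2.2 k) then (st.2.1 ++ [k], PySem.Set.add st.2.2 k)
            else (st.2.1, st.2.2))
      else st
    else st

def walkRun (srt : List String) (pref : List Char) (j : Nat)
    (st : Bool × List String × PySem.Set String) : Bool × List String × PySem.Set String :=
  walkGo srt pref (srt.length - j) j st

def resolve_sport_keys_alt (user_base_keys : List String) (api_active_keys : List String) : List String :=
  if api_active_keys.isEmpty then user_base_keys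
  else
    let srt := PySem.List.sorted api_active_keys (fun s => s.toList) false
    let n := srt.length
    (user_base_keys.foldl (fun (st : List String × PySem.Set String) base =>
      -- verbatim match via binary search
      let i := bisectLeftStr srt base 0 n
      let st :=
        if i < n ∧ srt.getD i "" = base ∧ !(PySem.Set.contains st.2 base) then
          (st.1 ++ [base], PySem.Set.add st.2 base)
        else st
      -- sub-keys form a contiguous run of the sorted list
      let pref := base.toList ++ ['_']
      let j := bisectLeftStr srt (String.ofList pref) 0 n
      let w := walkRun srt pref j (false, st)
      let st := w.2
      if w.1 = false ∧ !(PySem.Set.contains st.2 base) then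
        (st.1 ++ [base], PySem.Set.add st.2 base)
      else st) ([], PySem.Set.empty)).1

-- ===== PRECONDITION & SPEC =====
def Spec_resolve_sport_keys (user_base_keys : List String) (api_active_keys : List String) (out : List String) : Prop := out = resolve_sport_keys_alt user_base_keys api_active_keys
instance (user_base_keys : List String) (api_active_keys : List String) (out : List String) : Decidable (Spec_resolve_sport_keys user_base_keys api_active_keys out) := by unfold Spec_resolve_sport_keys; infer_instance

-- ===== CLAIM (what is proved, stated in full; the proofs are below) =====
def Claim_equal_resolve_sport_keys : Prop := ∀ (user_base_keys : List String) (api_active_keys : List String), Dom_resolve_sport_keys user_base_keys api_active_keys → Spec_resolve_sport_keys user_base_keys api_active_keys (resolve_sport_keys user_base_keys api_active_keys)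

-- ===== LEMMAS AND PROOFS =====

-- the common "append k unless seen" step both loops perform
def pvStep (st : List String × PySem.Set String) (k : String) : List String × PySem.Set String :=
  if !(PySem.Set.contains st.2 k) then (st.1 ++ [k], PySem.Set.add st.2 k) else st

-- compositional views of the two ports' per-base steps (each definitionally equal to
-- the corresponding fold lambda)
def pvVerbA (aa : List String) (st : List String × PySem.Set String) (base : String) :
    List String × PySem.Set String :=
  if PySem.Set.contains (PySem.Set.ofList aa) base then pvStep st base else st

def pvLoopA (aa : List String) (base : String) (st : List String × PySem.Set String) :
    List String × PySem.Set String :=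
  (PySem.List.sorted aa (fun s => s.toList) false).foldl
    (fun st ak =>
      if PySem.Chars.startswith ak.toList (base.toList ++ ['_']) || ak == base then
        pvStep st ak
      else st) st

def pvFallA (aa : List String) (base : String) (st : List String × PySem.Set String) :
    List String × PySem.Set String :=
  if !(PySem.Set.contains st.2 base)
      && !(aa.any (fun ak => PySem.Chars.startswith ak.toList (base.toList ++ ['_']))) then
    (st.1 ++ [base], PySem.Set.add st.2 base)
  else st

def pvStepA (aa : List String) (st : List String × PySem.Set String) (base : String) :
    List String × PySem.Set String :=
  pvFallA aa base (pvLoopA aa base (pvVerbA aa st base))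

def pvVerbB (aa : List String) (st : List String × PySem.Set String) (base : String) :
    List String × PySem.Set String :=
  if bisectLeftStr (PySem.List.sorted aa (fun s => s.toList) false) base 0
        (PySem.List.sorted aa (fun s => s.toList) false).length
      < (PySem.List.sorted aa (fun s => s.toList) false).length ∧
      (PySem.List.sorted aa (fun s => s.toList) false).getD
        (bisectLeftStr (PySem.List.sorted aa (fun s => s.toList) false) base 0
          (PySem.List.sorted aa (fun s => s.toList) false).length) "" = base ∧
      !(PySem.Set.contains st.2 base) then
    (st.1 ++ [base], PySem.Set.add st.2 base)
  else st

def pvFallB (_aa : List String) (base : String) (w : Bool × List String × PySem.Set String) :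
    List String × PySem.Set String :=
  if w.1 = false ∧ !(PySem.Set.contains w.2.2 base) then
    (w.2.1 ++ [base], PySem.Set.add w.2.2 base)
  else w.2

def pvStepB (aa : List String) (st : List String × PySem.Set String) (base : String) :
    List String × PySem.Set String :=
  pvFallB aa base
    (walkRun (PySem.List.sorted aa (fun s => s.toList) false) (base.toList ++ ['_'])
      (bisectLeftStr (PySem.List.sorted aa (fun s => s.toList) false)
        (String.ofList (base.toList ++ ['_'])) 0
        (PySem.List.sorted aa (fun s => s.toList) false).length)
      (false, pvVerbB aa st base))

lemma pvStep_of_mem {st : List String × PySem.Set String} {k : String} (h : k ∈ st.2) :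
    pvStep st k = st := by
  simp [pvStep, h]

lemma mem_pvStep_snd {st : List String × PySem.Set String} {x : String} (k : String)
    (h : x ∈ st.2) : x ∈ (pvStep st k).2 := by
  unfold pvStep
  split
  · exact (PySem.Set.mem_add _ _ _).2 (Or.inl h)
  · exact h

lemma mem_pvStep_self (st : List String × PySem.Set String) (k : String) :
    k ∈ (pvStep st k).2 := by
  unfold pvStep
  split
  · exact (PySem.Set.mem_add _ _ _).2 (Or.inr rfl)
  · rename_i h
    rcases Bool.eq_false_or_eq_true (PySem.Set.contains st.2 k) with ht | hf
    · exact (PySem.Set.contains_iff st.2 k).mp ht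
    · exact absurd (by rw [hf]; rfl) h

-- dropping the (already-seen) base occurrences from the processed list changes nothing
lemma foldl_pvStep_filter_or {P : String → Bool} {base : String} (hPb : P base = false) :
    ∀ (l : List String) (st : List String × PySem.Set String), base ∈ st.2 →
      (l.filter (fun ak => P ak || ak == base)).foldl pvStep st
        = (l.filter P).foldl pvStep st := by
  intro l
  induction l with
  | nil => intro st _; rfl
  | cons a l ih =>
    intro st hb
    by_cases hPa : P a = true
    · rw [List.filter_cons_of_pos (by simp [hPa]), List.filter_cons_of_pos hPa,
        List.foldl_cons, List.foldl_cons]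
      exact ih (pvStep st a) (mem_pvStep_snd a hb)
    · simp only [Bool.not_eq_true] at hPa
      by_cases hab : a = base
      · subst hab
        rw [List.filter_cons_of_pos (by simp [hPa]), List.filter_cons_of_neg (by simp [hPa]),
          List.foldl_cons, pvStep_of_mem hb]
        exact ih st hb
      · rw [List.filter_cons_of_neg (by simp [hPa, hab]), List.filter_cons_of_neg (by simp [hPa])]
        exact ih st hb

-- lexicographic facts: a string with prefix p is ≥ (String.ofList p), and any string
-- ≥ (String.ofList p) without the prefix is > every string with it
lemma lex_prefix_not_lt {p s : List Char} (h : p <+: s) : ¬ List.Lex (· < ·) s p := by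
  induction p generalizing s with
  | nil => intro hl; cases hl
  | cons c p' ih =>
    obtain ⟨t, rfl⟩ := h
    intro hl
    cases hl with
    | rel hr => exact lt_irrefl _ hr
    | cons hl' => exact ih ⟨t, rfl⟩ hl'

lemma lex_gap {p s t : List Char} (hnp : ¬ p <+: s) (hns : ¬ List.Lex (· < ·) s p)
    (hpt : p <+: t) : List.Lex (· < ·) t s := by
  induction p generalizing s t with
  | nil => exact absurd (List.nil_prefix) hnp
  | cons c p' ih =>
    obtain ⟨u, rfl⟩ := hpt
    cases s with
    | nil => exact absurd List.Lex.nil hns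
    | cons d s' =>
      by_cases hcd : c = d
      · subst hcd
        refine List.Lex.cons (ih ?_ ?_ ⟨u, rfl⟩)
        · intro hp; exact hnp (List.cons_prefix_cons.mpr ⟨rfl, hp⟩)
        · intro hl; exact hns (List.Lex.cons hl)
      · rcases lt_trichotomy c d with h1 | h2 | h3
        · exact List.Lex.rel h1
        · exact absurd h2 hcd
        · exact absurd (List.Lex.rel h3) hns

lemma listchar_lt_iff_lex (s t : List Char) : s < t ↔ List.Lex (· < ·) s t :=
  List.lt_iff_lex_lt s t

lemma strLt_iff (s t : String) :
    PySem.Chars.strLt s.toList t.toList = true ↔ s.toList < t.toList := by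
  simp [PySem.Chars.strLt]

lemma prefix_le {p s : List Char} (h : p <+: s) : p ≤ s := by
  rw [← not_lt, listchar_lt_iff_lex]
  exact lex_prefix_not_lt h

lemma gap_lt {p s t : List Char} (hnp : ¬ p <+: s) (hle : p ≤ s) (hpt : p <+: t) : t < s := by
  rw [listchar_lt_iff_lex]
  refine lex_gap hnp ?_ hpt
  rw [← not_lt] at hle
  rw [← listchar_lt_iff_lex]
  exact hle

lemma bisect_spec_aux (a : List String) (x : String)
    (hmono : ∀ p q : Nat, p ≤ q → q < a.length → (a.getD p "").toList ≤ (a.getD q "").toList) :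
    ∀ (n lo hi : Nat), hi - lo ≤ n → lo ≤ hi → hi ≤ a.length →
      (∀ k < lo, (a.getD k "").toList < x.toList) →
      (∀ k, hi ≤ k → k < a.length → ¬ (a.getD k "").toList < x.toList) →
      bisectGo a x n lo hi ≤ a.length ∧
      (∀ k < bisectGo a x n lo hi, (a.getD k "").toList < x.toList) ∧
      (∀ k, bisectGo a x n lo hi ≤ k → k < a.length → ¬ (a.getD k "").toList < x.toList) := by
  intro n
  induction n with
  | zero =>
    intro lo hi hn hle hhi hpre hpost
    simp only [bisectGo]
    exact ⟨by omega, hpre, fun k hk1 hk2 => hpost k (by omega) hk2⟩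
  | succ n ih =>
    intro lo hi hn hle hhi hpre hpost
    simp only [bisectGo]
    by_cases h : lo < hi
    · simp only [if_pos h]
      by_cases hc : PySem.Chars.strLt (a.getD ((lo + hi) / 2) "").toList x.toList = true
      · simp only [if_pos hc]
        rw [strLt_iff] at hc
        refine ih ((lo + hi) / 2 + 1) hi (by omega) (by omega) hhi ?_ hpost
        intro k hk
        exact lt_of_le_of_lt (hmono k ((lo + hi) / 2) (by omega) (by omega)) hc
      · simp only [if_neg hc]
        rw [strLt_iff] at hc
        refine ih lo ((lo + hi) / 2) (by omega) (by omega) (by omega) hpre ?_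
        intro k hk1 hk2 hlt
        exact hc (lt_of_le_of_lt (hmono ((lo + hi) / 2) k hk1 hk2) hlt)
    · rw [if_neg h]
      exact ⟨by omega, hpre, fun k hk1 hk2 => hpost k (by omega) hk2⟩

lemma bisect_spec_full (a : List String) (x : String)
    (hmono : ∀ p q : Nat, p ≤ q → q < a.length → (a.getD p "").toList ≤ (a.getD q "").toList) :
    bisectLeftStr a x 0 a.length ≤ a.length ∧
    (∀ k < bisectLeftStr a x 0 a.length, (a.getD k "").toList < x.toList) ∧
    (∀ k, bisectLeftStr a x 0 a.length ≤ k → k < a.length → ¬ (a.getD k "").toList < x.toList) := by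
  unfold bisectLeftStr
  exact bisect_spec_aux a x hmono (a.length - 0) 0 a.length (le_refl _) (by omega) (le_refl _)
    (fun k hk => absurd hk (Nat.not_lt_zero k))
    (fun k h1 h2 => absurd h2 (by omega))

-- structural form of the while loop, over the processed suffix
def pvWalkAux (pref : List Char) : List String → Bool × List String × PySem.Set String →
    Bool × List String × PySem.Set String
  | [], st => st
  | k :: t, st =>
    if PySem.Chars.startswith k.toList pref then pvWalkAux pref t (true, pvStep st.2 k) else st

lemma walkGo_eq_walkAux (srt : List String) (pref : List Char) :
    ∀ (fuel j : Nat), srt.length - j ≤ fuel →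
      ∀ st, walkGo srt pref fuel j st = pvWalkAux pref (srt.drop j) st := by
  intro fuel
  induction fuel with
  | zero =>
    intro j hj st
    rw [List.drop_eq_nil_iff.mpr (by omega)]
    rfl
  | succ fuel ih =>
    intro j hj st
    simp only [walkGo]
    by_cases h : j < srt.length
    · rw [if_pos h, List.drop_eq_getElem_cons h]
      simp only [List.getD_eq_getElem srt "" h, pvWalkAux]
      by_cases hs : PySem.Chars.startswith srt[j].toList pref
      · rw [if_pos hs, if_pos hs]
        exact ih (j + 1) (by omega) _
      · rw [if_neg hs, if_neg hs]
    · rw [if_neg h, List.drop_eq_nil_iff.mpr (by omega), pvWalkAux]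

lemma walkRun_eq_walkAux (srt : List String) (pref : List Char) (j : Nat)
    (st : Bool × List String × PySem.Set String) :
    walkRun srt pref j st = pvWalkAux pref (srt.drop j) st :=
  walkGo_eq_walkAux srt pref (srt.length - j) j (le_refl _) st

lemma walkAux_spec (pref : List Char) :
    ∀ (t : List String) (b : Bool) (st : List String × PySem.Set String),
      pvWalkAux pref t (b, st)
        = (b || !(t.takeWhile (fun s => PySem.Chars.startswith s.toList pref)).isEmpty,
           (t.takeWhile (fun s => PySem.Chars.startswith s.toList pref)).foldl pvStep st) := by
  intro t
  induction t with
  | nil => intro b st; simp [pvWalkAux]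
  | cons k t ih =>
    intro b st
    rw [pvWalkAux, List.takeWhile_cons]
    by_cases hs : PySem.Chars.startswith k.toList pref
    · rw [if_pos hs, if_pos hs, ih]
      simp
    · rw [if_neg hs, if_neg hs]
      simp

-- in a ≤-sorted list whose elements are all ≥ String.ofList pref, the pref-prefixed
-- elements are an initial run
lemma takeWhile_eq_filter_of_sorted (pref : List Char) :
    ∀ (t : List String), t.Pairwise (fun a b => a.toList ≤ b.toList) →
      (∀ s ∈ t, pref ≤ s.toList) →
      t.takeWhile (fun s => PySem.Chars.startswith s.toList pref)
        = t.filter (fun s => PySem.Chars.startswith s.toList pref) := by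
  intro t
  induction t with
  | nil => intro _ _; rfl
  | cons k t ih =>
    intro hp hge
    rw [List.takeWhile_cons]
    by_cases hs : PySem.Chars.startswith k.toList pref
    · rw [if_pos hs, List.filter_cons, if_pos hs,
        ih (List.Pairwise.of_cons hp) (fun s hsm => hge s (List.mem_cons_of_mem _ hsm))]
    · rw [if_neg hs, List.filter_cons, if_neg hs]
      have : t.filter (fun s => PySem.Chars.startswith s.toList pref) = [] := by
        rw [List.filter_eq_nil_iff]
        intro u hu hPu
        have hku : k.toList ≤ u.toList := (List.pairwise_cons.mp hp).1 u hu
        have : u.toList < k.toList := by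
          refine gap_lt (fun hpk => hs ((PySem.Chars.startswith_iff _ _).mpr hpk))
            (hge k List.mem_cons_self) ((PySem.Chars.startswith_iff _ _).mp hPu)
        exact absurd hku (not_le.mpr this)
      rw [this]

lemma any_eq_not_isEmpty_filter (l : List String) (P : String → Bool) :
    l.any P = !(l.filter P).isEmpty := by
  rw [Bool.eq_iff_iff]
  simp [List.any_eq_true, List.filter_eq_nil_iff]

lemma base_not_self_prefix (base : String) :
    PySem.Chars.startswith base.toList (base.toList ++ ['_']) = false := by
  rw [Bool.eq_false_iff]
  intro h
  have := ((PySem.Chars.startswith_iff _ _).mp h).length_le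
  simp at this

-- the port elaborates sorted's DecidableLT (List Char) instance differently from the
-- PySem order lemmas; the two instances are propositionally equal
lemma sorted_toList_eq (aa : List String) :
    PySem.List.sorted aa (fun s => s.toList) false
      = @PySem.List.sorted String (List Char) LinearOrder.toPartialOrder.toLT
          LinearOrder.toDecidableLT aa (fun s => s.toList) false := by
  have hde : (fun (a b : List Char) => a.decidableLT b)
      = (LinearOrder.toDecidableLT : DecidableLT (List Char)) := by
    funext a b
    exact Subsingleton.elim _ _
  rw [show (PySem.List.sorted aa (fun s => s.toList) false : List String)
      = @PySem.List.sorted String (List Char) List.instLT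
          (fun a b => a.decidableLT b) aa (fun s => s.toList) false from rfl, hde]

-- stage 1: the verbatim branches agree (binary-search hit ↔ set membership)
lemma pvVerb_eq (aa : List String) (st : List String × PySem.Set String) (base : String) :
    pvVerbA aa st base = pvVerbB aa st base := by
  unfold pvVerbA pvVerbB
  set srt := PySem.List.sorted aa (fun s => s.toList) false with hsrt
  have hmono : ∀ u v : Nat, u ≤ v → v < srt.length →
      (srt.getD u "").toList ≤ (srt.getD v "").toList := by
    intro u v huv hv
    rw [List.getD_eq_getElem _ _ (lt_of_le_of_lt huv hv), List.getD_eq_getElem _ _ hv]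
    simp only [hsrt, sorted_toList_eq] at hv ⊢
    exact PySem.List.key_sorted_getElem_mono aa (fun s => s.toList) huv hv
  obtain ⟨hi1, hi2, hi3⟩ := bisect_spec_full srt base hmono
  set i := bisectLeftStr srt base 0 srt.length with hi
  by_cases hmem : base ∈ aa
  · have hc : PySem.Set.contains (PySem.Set.ofList aa) base = true :=
      (PySem.Set.contains_iff _ _).mpr ((PySem.Set.mem_ofList _ _).mpr hmem)
    have hbs : base ∈ srt := (PySem.List.mem_sorted aa (fun s => s.toList) false base).mpr hmem
    obtain ⟨q, hq, hqe⟩ := List.mem_iff_getElem.mp hbs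
    have hqi : i ≤ q := by
      by_contra hlt
      have := hi2 q (by omega)
      rw [List.getD_eq_getElem _ _ hq, hqe] at this
      exact lt_irrefl _ this
    have hilen : i < srt.length := lt_of_le_of_lt hqi hq
    have hieq : srt.getD i "" = base := by
      have h1 : (srt.getD i "").toList ≤ (srt.getD q "").toList := hmono i q hqi hq
      rw [List.getD_eq_getElem _ _ hq, hqe] at h1
      have h2 : (srt.getD i "").toList = base.toList :=
        le_antisymm h1 (not_lt.mp (hi3 i (le_refl _) hilen))
      rw [← @String.ofList_toList (srt.getD i ""), h2, String.ofList_toList]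
    rw [if_pos hc]
    by_cases hseen : PySem.Set.contains st.2 base = true
    · rw [pvStep, if_neg (by rw [hseen]; decide),
        if_neg (by rintro ⟨-, -, h3⟩; rw [hseen] at h3; exact absurd h3 (by decide))]
    · simp only [Bool.not_eq_true] at hseen
      rw [pvStep, if_pos (by rw [hseen]; decide),
        if_pos ⟨hilen, hieq, by rw [hseen]; decide⟩]
  · have hc : PySem.Set.contains (PySem.Set.ofList aa) base = false := by
      rw [Bool.eq_false_iff]
      intro hcc
      exact hmem ((PySem.Set.mem_ofList _ _).mp ((PySem.Set.contains_iff _ _).mp hcc))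
    rw [if_neg (by rw [hc]; decide), if_neg ?_]
    rintro ⟨h1, h2, _⟩
    apply hmem
    refine (PySem.List.mem_sorted aa (fun s => s.toList) false base).mp ?_
    rw [← h2, List.getD_eq_getElem _ _ h1]
    exact List.getElem_mem h1

lemma mem_pvVerbA (aa : List String) (st : List String × PySem.Set String) (base : String)
    (hmem : base ∈ aa) : base ∈ (pvVerbA aa st base).2 := by
  unfold pvVerbA
  rw [if_pos ((PySem.Set.contains_iff _ _).mpr ((PySem.Set.mem_ofList _ _).mpr hmem))]
  exact mem_pvStep_self st base

-- stage 2: A's pass over the whole sorted list = the seen-fold over the prefix-filtered list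
lemma pvLoopA_eq_filter (aa : List String) (base : String)
    (st1 : List String × PySem.Set String) (hb : base ∈ aa → base ∈ st1.2) :
    pvLoopA aa base st1
      = ((PySem.List.sorted aa (fun s => s.toList) false).filter
          (fun s => PySem.Chars.startswith s.toList (base.toList ++ ['_']))).foldl pvStep st1 := by
  unfold pvLoopA
  rw [PySem.List.foldl_if_eq_foldl_filter
    (p := fun ak => PySem.Chars.startswith ak.toList (base.toList ++ ['_']) || ak == base)
    (f := pvStep)]
  by_cases hmem : base ∈ aa
  · exact foldl_pvStep_filter_or (base_not_self_prefix base) _ st1 (hb hmem)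
  · congr 1
    apply List.filter_congr
    intro x hx
    have hxb : x ≠ base := fun he =>
      hmem (he ▸ (PySem.List.mem_sorted aa (fun s => s.toList) false x).mp hx)
    simp [hxb]

-- stage 3: the binary-searched while-loop computes the same fold (and the matched flag)
lemma walkRun_spec (aa : List String) (base : String)
    (st1 : List String × PySem.Set String) :
    walkRun (PySem.List.sorted aa (fun s => s.toList) false) (base.toList ++ ['_'])
        (bisectLeftStr (PySem.List.sorted aa (fun s => s.toList) false)
          (String.ofList (base.toList ++ ['_'])) 0
          (PySem.List.sorted aa (fun s => s.toList) false).length)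
        (false, st1)
      = (!((PySem.List.sorted aa (fun s => s.toList) false).filter
            (fun s => PySem.Chars.startswith s.toList (base.toList ++ ['_']))).isEmpty,
         ((PySem.List.sorted aa (fun s => s.toList) false).filter
            (fun s => PySem.Chars.startswith s.toList (base.toList ++ ['_']))).foldl pvStep st1) := by
  set srt := PySem.List.sorted aa (fun s => s.toList) false with hsrt
  set p : List Char := base.toList ++ ['_'] with hp
  have hmono : ∀ u v : Nat, u ≤ v → v < srt.length →
      (srt.getD u "").toList ≤ (srt.getD v "").toList := by
    intro u v huv hv
    rw [List.getD_eq_getElem _ _ (lt_of_le_of_lt huv hv), List.getD_eq_getElem _ _ hv]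
    simp only [hsrt, sorted_toList_eq] at hv ⊢
    exact PySem.List.key_sorted_getElem_mono aa (fun s => s.toList) huv hv
  have hpair : srt.Pairwise (fun a b => a.toList ≤ b.toList) := by
    rw [hsrt, sorted_toList_eq]
    exact PySem.List.sorted_pairwise aa (fun s => s.toList)
  obtain ⟨hj1, hj2, hj3⟩ := bisect_spec_full srt (String.ofList p) hmono
  set jj := bisectLeftStr srt (String.ofList p) 0 srt.length with hj
  rw [walkRun_eq_walkAux, walkAux_spec]
  have hfilter : (srt.drop jj).takeWhile (fun s => PySem.Chars.startswith s.toList p)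
      = srt.filter (fun s => PySem.Chars.startswith s.toList p) := by
    rw [takeWhile_eq_filter_of_sorted p (srt.drop jj)
      (List.Pairwise.sublist (List.drop_sublist jj srt) hpair) ?side]
    case side =>
      intro s hs
      obtain ⟨j2, hj2', hje⟩ := List.mem_drop_iff_getElem.mp hs
      have hnl := hj3 (jj + j2) (by omega) (by omega)
      rw [List.getD_eq_getElem _ _ (by omega), hje, String.toList_ofList] at hnl
      exact not_lt.mp hnl
    conv_rhs => rw [← List.take_append_drop jj srt]
    rw [List.filter_append]
    have htake : (srt.take jj).filter (fun s => PySem.Chars.startswith s.toList p) = [] := by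
      rw [List.filter_eq_nil_iff]
      intro u hu hPu
      obtain ⟨k, hk, hke⟩ := List.mem_take_iff_getElem.mp hu
      have hlt : (srt.getD k "").toList < (String.ofList p).toList := hj2 k (by omega)
      rw [List.getD_eq_getElem _ _ (by omega), hke, String.toList_ofList] at hlt
      exact absurd hlt (not_lt.mpr (prefix_le ((PySem.Chars.startswith_iff _ _).mp hPu)))
    rw [htake, List.nil_append]
  rw [hfilter]
  simp

-- stage 4: the fallback branches agree
lemma pvFall_eq (aa : List String) (base : String) (st2 : List String × PySem.Set String) :
    pvFallA aa base st2
      = pvFallB aa base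
          (!((PySem.List.sorted aa (fun s => s.toList) false).filter
              (fun s => PySem.Chars.startswith s.toList (base.toList ++ ['_']))).isEmpty, st2) := by
  unfold pvFallA pvFallB
  have hany : aa.any (fun ak => PySem.Chars.startswith ak.toList (base.toList ++ ['_']))
      = !((PySem.List.sorted aa (fun s => s.toList) false).filter
          (fun s => PySem.Chars.startswith s.toList (base.toList ++ ['_']))).isEmpty := by
    rw [← (PySem.List.sorted_perm aa (fun s => s.toList) false).any_eq]
    exact any_eq_not_isEmpty_filter _ _
  rw [hany]
  by_cases h1 : PySem.Set.contains st2.2 base = true <;>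
    by_cases h2 : ((PySem.List.sorted aa (fun s => s.toList) false).filter
      (fun s => PySem.Chars.startswith s.toList (base.toList ++ ['_']))).isEmpty = true <;>
    simp [h1, h2]

-- the per-base steps of the two ports agree on every state
lemma pvStep_eq (aa : List String) (st : List String × PySem.Set String) (base : String) :
    pvStepA aa st base = pvStepB aa st base := by
  unfold pvStepA pvStepB
  rw [← pvVerb_eq aa st base,
    walkRun_spec aa base (pvVerbA aa st base),
    pvLoopA_eq_filter aa base (pvVerbA aa st base) (mem_pvVerbA aa st base),
    pvFall_eq]

-- ===== VERDICT (by name: the statement is the Claim_ definition above) =====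
theorem resolve_sport_keys_spec : Claim_equal_resolve_sport_keys := by
  intro ub aa _
  show resolve_sport_keys ub aa = resolve_sport_keys_alt ub aa
  unfold resolve_sport_keys resolve_sport_keys_alt
  by_cases h : aa.isEmpty
  · rw [if_pos h, if_pos h]
  · rw [if_neg h, if_neg h]
    refine congrArg Prod.fst ?_
    exact PySem.List.foldl_congr_mem ub (pvStepA aa) (pvStepB aa) ([], PySem.Set.empty)
      (fun st x _ => pvStep_eq aa st x)
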